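-- pv_equiv track=rewrite | github.com/nimishshah1989/mfpulse_reimagined | backend/app/services/morningstar_fetcher.py | _split_holding_details
-- ===== SOURCE A (Python) =====
-- def _split_holding_details(detail_raw: dict[str, str]) -> list[dict[str, str]]:
--     """Split pipe-delimited holding detail fields into a list of dicts.
--
--     Morningstar returns holding details as pipe-delimited values:
--       HoldingDetail_Name: "HDFC Bank|Infosys|TCS"
--       HoldingDetail_Weighting: "8.5|6.2|5.1"
--
--     Returns a list of dicts, one per holding.
--     """
--     if not detail_raw:
--         return []
--
--     # Split all fields by pipe
--     split_fields: dict[str, list[str]] = {}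
--     max_len = 0
--     for key, value in detail_raw.items():
--         parts = value.split("|")
--         split_fields[key] = parts
--         max_len = max(max_len, len(parts))
--
--     # Build list of holding dicts
--     holdings: list[dict[str, str]] = []
--     for i in range(max_len):
--         holding: dict[str, str] = {}
--         for key, parts in split_fields.items():
--             if i < len(parts) and parts[i]:
--                 holding[key] = parts[i]
--         if holding:
--             holdings.append(holding)
--
--     return holdings
-- ===== SOURCE B (Python) =====
-- def _split_holding_details(detail_raw: dict[str, str]) -> list[dict[str, str]]:
--     """Column-major transpose: pre-allocate one dict per position, fill field by field."""
--     if not detail_raw: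
--         return []
--     columns = [value.split("|") for value in detail_raw.values()]
--     max_len = max(len(parts) for parts in columns)
--     holdings: list[dict[str, str]] = [{} for _ in range(max_len)]
--     for key, parts in zip(detail_raw.keys(), columns):
--         for i, cell in enumerate(parts):
--             if cell:
--                 holdings[i][key] = cell
--     return [h for h in holdings if h]
-- ===== Notes on version B (the rewrite author's own statement) =====
-- stated objective: alternative
-- what changed: B transposes column-major: it pre-allocates one empty dict per holding position and fills them field by field (holdings[i][key] = cell), instead of A's row-major pass that re-scans every field with a bounds check for each row index.
import Mathlib
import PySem

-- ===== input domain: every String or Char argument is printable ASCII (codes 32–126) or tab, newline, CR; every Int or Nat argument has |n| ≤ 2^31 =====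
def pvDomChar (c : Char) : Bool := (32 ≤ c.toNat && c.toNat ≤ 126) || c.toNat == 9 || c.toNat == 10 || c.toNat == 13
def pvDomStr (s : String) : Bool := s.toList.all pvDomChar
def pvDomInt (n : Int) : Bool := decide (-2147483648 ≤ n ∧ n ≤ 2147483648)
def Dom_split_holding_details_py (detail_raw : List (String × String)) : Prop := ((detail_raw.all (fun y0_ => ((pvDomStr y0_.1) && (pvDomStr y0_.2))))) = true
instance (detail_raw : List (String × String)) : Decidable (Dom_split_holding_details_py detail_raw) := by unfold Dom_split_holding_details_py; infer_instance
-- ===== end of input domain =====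

-- B replaces A's row-major scan (per row, bounds-check every field) by a column-major fill of
-- pre-allocated rows; objective: alternative (same cost, genuinely different traversal).

-- Shared input decoding: the Python parameter is a dict; per the convention an association list
-- denotes the dict whose FIRST binding per key wins, so `.items()` iterates this deduplicated list.
def pyDictItems (l : List (String × String)) : List (String × String) :=
  l.foldl (fun acc kv => if acc.any (fun p => p.1 = kv.1) then acc else acc ++ [kv]) []

-- value.split("|"): the separator "|" is nonempty, so split? is always `some`; getD [] is exact
def pySplitPipe (s : String) : List String := (PySem.Str.split? s "|").getD []

-- A's inner loop (build one holding dict; its keys are unique, so inserts append), named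
def rowA (fields : List (String × List String)) (i : Nat) : List (String × String) :=
  fields.foldl (fun h kp =>
      if i < kp.2.length ∧ kp.2.getD i "" ≠ "" then h ++ [(kp.1, kp.2.getD i "")] else h) []

-- ===== PORT A =====
-- split_fields keys are unique (dict keys), so each dict insertion appends: the dict is the list of
-- (key, parts) pairs built in one pass together with max_len, exactly as A's first loop does.
def split_holding_details_py (detail_raw : List (String × String)) : List (List (String × String)) :=
  if detail_raw = [] then [] else
  let items := pyDictItems detail_raw
  let sm := items.foldl (fun (acc : List (String × List String) × Nat) kv =>
      let parts := pySplitPipe kv.2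
      (acc.1 ++ [(kv.1, parts)], max acc.2 parts.length)) ([], 0)
  -- range(max_len) over the natural numbers 0 … max_len-1; holding's keys are unique, inserts append
  (List.range sm.2).foldl (fun holdings i =>
      let holding := rowA sm.1 i
      if holding ≠ [] then holdings ++ [holding] else holdings) []

-- ===== PORT B =====
-- enumerate(parts): indices are the nonnegative positions 0,1,2,…, ported with Nat counters (exact)
def enumFrom (j : Nat) : List String → List (Nat × String)
  | [] => []
  | x :: xs => (j, x) :: enumFrom (j + 1) xs

-- holdings[i][key] = cell for one field: key is new to every row dict it touches, so it appends
def fillCell (k : String) (hs : List (List (String × String))) (ic : Nat × String) :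
    List (List (String × String)) :=
  if ic.2 ≠ "" then hs.set ic.1 (hs.getD ic.1 [] ++ [(k, ic.2)]) else hs

def fillField (hs : List (List (String × String))) (k : String) (parts : List String) :
    List (List (String × String)) :=
  (enumFrom 0 parts).foldl (fillCell k) hs

def split_holding_details_py_alt (detail_raw : List (String × String)) : List (List (String × String)) :=
  if detail_raw = [] then [] else
  let items := pyDictItems detail_raw
  let columns := items.map (fun kv => pySplitPipe kv.2)
  -- max(nonempty lengths); the 0 seed is exact since the lengths are natural numbers
  let maxLen := (columns.map List.length).foldl max 0
  let filled := (items.zip columns).foldl (fun hs p => fillField hs p.1.1 p.2)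
      (List.replicate maxLen ([] : List (String × String)))
  filled.filter (fun h => h ≠ [])

-- ===== PRECONDITION & SPEC =====
def Spec_split_holding_details_py (detail_raw : List (String × String)) (out : List (List (String × String))) : Prop := out = split_holding_details_py_alt detail_raw
instance (detail_raw : List (String × String)) (out : List (List (String × String))) : Decidable (Spec_split_holding_details_py detail_raw out) := by unfold Spec_split_holding_details_py; infer_instance

-- ===== CLAIM (what is proved, stated in full; the proofs are below) =====
def Claim_equal_split_holding_details_py : Prop := ∀ (detail_raw : List (String × String)), Dom_split_holding_details_py detail_raw → Spec_split_holding_details_py detail_raw (split_holding_details_py detail_raw)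

-- ===== LEMMAS AND PROOFS =====

-- A's one-pass loop, characterised: the pair it builds is (list of (key,parts), running max)
theorem splitFold_eq (items : List (String × String)) (acc : List (String × List String)) (m : Nat) :
    items.foldl (fun (acc : List (String × List String) × Nat) kv =>
        let parts := pySplitPipe kv.2
        (acc.1 ++ [(kv.1, parts)], max acc.2 parts.length)) (acc, m)
      = (acc ++ items.map (fun kv => (kv.1, pySplitPipe kv.2)),
         (items.map (fun kv => (pySplitPipe kv.2).length)).foldl max m) := by
  induction items generalizing acc m with
  | nil => simp
  | cons kv rest ih => simp [ih]

-- folds of fillCell keep [] at []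
theorem fillCells_nil (k : String) (cells : List (Nat × String)) :
    cells.foldl (fillCell k) [] = [] := by
  induction cells with
  | nil => rfl
  | cons c cs ih => simpa [fillCell] using ih

-- cells with indices ≥ 1 never touch the head
theorem fillCells_shift (k : String) (parts : List String) :
    ∀ (j : Nat) (h0 : List (String × String)) (t : List (List (String × String))),
    (enumFrom (j + 1) parts).foldl (fillCell k) (h0 :: t)
      = h0 :: (enumFrom j parts).foldl (fillCell k) t := by
  induction parts with
  | nil => intro j h0 t; rfl
  | cons c rest ih =>
      intro j h0 t
      by_cases hc : c = "" <;> simp [enumFrom, fillCell, hc, List.getD, ih]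

-- folds of fillCell preserve length
theorem fillCells_length (k : String) (cells : List (Nat × String)) :
    ∀ hs, (cells.foldl (fillCell k) hs).length = hs.length := by
  induction cells with
  | nil => intro hs; rfl
  | cons c cs ih => intro hs; by_cases hc : c.2 = "" <;> simp [fillCell, hc, ih]

theorem fillField_cons (k : String) (c : String) (rest : List String)
    (h0 : List (String × String)) (t : List (List (String × String))) :
    fillField (h0 :: t) k (c :: rest)
      = (if c ≠ "" then h0 ++ [(k, c)] else h0) :: fillField t k rest := by
  by_cases hc : c = "" <;>
    simp [fillField, enumFrom, fillCell, hc, List.getD, fillCells_shift]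

-- one field's fill, pointwise
theorem fillField_getD (k : String) (parts : List String) :
    ∀ (hs : List (List (String × String))) (i : Nat),
    (fillField hs k parts).getD i []
      = if i < hs.length ∧ i < parts.length ∧ parts.getD i "" ≠ ""
        then hs.getD i [] ++ [(k, parts.getD i "")] else hs.getD i [] := by
  induction parts with
  | nil => intro hs i; simp [fillField, enumFrom]
  | cons c rest ih =>
      intro hs i
      cases hs with
      | nil => simp [fillField, enumFrom, fillCell, fillCells_nil]
      | cons h0 t =>
          rw [fillField_cons]
          cases i with
          | zero => by_cases hc : c = "" <;> simp [hc, List.getD]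
          | succ i' =>
              simp only [List.getD_cons_succ, List.length_cons, Nat.succ_lt_succ_iff, ih t i']

theorem fillField_length (k : String) (parts : List String) (hs : List (List (String × String))) :
    (fillField hs k parts).length = hs.length := fillCells_length k _ hs

theorem rowA_acc (i : Nat) :
    ∀ (fields : List (String × List String)) (acc : List (String × String)),
    fields.foldl (fun h kp =>
        if i < kp.2.length ∧ kp.2.getD i "" ≠ "" then h ++ [(kp.1, kp.2.getD i "")] else h) acc
      = acc ++ rowA fields i := by
  intro fields
  induction fields with
  | nil => intro acc; simp [rowA]
  | cons kp rest ih =>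
      intro acc
      simp only [rowA, List.foldl_cons]
      by_cases hc : i < kp.2.length ∧ kp.2.getD i "" ≠ ""
      · rw [if_pos hc, if_pos hc, ih, ih]
        simp [List.append_assoc]
      · rw [if_neg hc, if_neg hc, ih]
        rfl

theorem rowA_cons (kp : String × List String) (rest : List (String × List String)) (i : Nat) :
    rowA (kp :: rest) i
      = (if i < kp.2.length ∧ kp.2.getD i "" ≠ "" then [(kp.1, kp.2.getD i "")] else [])
          ++ rowA rest i := by
  simp only [rowA, List.foldl_cons]
  rw [rowA_acc i rest]
  by_cases hc : i < kp.2.length ∧ kp.2.getD i "" ≠ "" <;> simp [hc, rowA]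

-- the whole column-major fold, pointwise: row i ends up holding rowA fields i
theorem fieldsFold_getD (fields : List (String × List String)) :
    ∀ (hs : List (List (String × String))) (i : Nat), i < hs.length →
    (fields.foldl (fun hs kp => fillField hs kp.1 kp.2) hs).getD i []
      = hs.getD i [] ++ rowA fields i := by
  induction fields with
  | nil => intro hs i hi; simp [rowA]
  | cons kp rest ih =>
      intro hs i hi
      have h1 : (fillField hs kp.1 kp.2).length = hs.length := fillField_length _ _ _
      have h2 := ih (fillField hs kp.1 kp.2) i (by omega)
      rw [List.foldl_cons, h2, fillField_getD kp.1 kp.2 hs i, rowA_cons]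
      by_cases hc : i < kp.2.length ∧ kp.2.getD i "" ≠ ""
      · rw [if_pos ⟨hi, hc.1, hc.2⟩, if_pos hc]
        simp [List.append_assoc]
      · rw [if_neg (fun h => hc ⟨h.2.1, h.2.2⟩), if_neg hc]
        simp

theorem fieldsFold_length (fields : List (String × List String))
    (hs : List (List (String × String))) :
    (fields.foldl (fun hs kp => fillField hs kp.1 kp.2) hs).length = hs.length := by
  induction fields generalizing hs with
  | nil => rfl
  | cons kp rest ih => simp [ih, fillField_length]

-- A's outer loop: append-if over the row index range is map-then-filter
theorem appendIf_acc (f : Nat → List (String × String)) :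
    ∀ (l : List Nat) (acc : List (List (String × String))),
    l.foldl (fun holdings i =>
        let holding := f i
        if holding ≠ [] then holdings ++ [holding] else holdings) acc
      = acc ++ (l.map f).filter (fun h => h ≠ []) := by
  intro l
  induction l with
  | nil => intro acc; simp
  | cons i rest ih =>
      intro acc
      rw [List.foldl_cons, ih]
      by_cases hc : f i = [] <;> simp [hc]

-- the filled table IS the list of A's rows
theorem filled_eq_rows (fields : List (String × List String)) (n : Nat) :
    fields.foldl (fun hs kp => fillField hs kp.1 kp.2)
        (List.replicate n ([] : List (String × String)))
      = (List.range n).map (rowA fields) := by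
  apply List.ext_getElem
  · simp [fieldsFold_length]
  · intro i hi hi'
    have hn : i < n := by simpa [fieldsFold_length] using hi
    have hlen : i < (fields.foldl (fun hs kp => fillField hs kp.1 kp.2)
        (List.replicate n ([] : List (String × String)))).length := hi
    have := fieldsFold_getD fields (List.replicate n ([] : List (String × String))) i
        (by simpa using hn)
    rw [← List.getD_eq_getElem _ [] hlen, this]
    simp [hn]

-- ===== VERDICT (by name: the statement is the Claim_ definition above) =====
theorem split_holding_details_py_spec : Claim_equal_split_holding_details_py := by
  intro detail_raw _
  unfold Spec_split_holding_details_py split_holding_details_py split_holding_details_py_alt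
  by_cases hnil : detail_raw = []
  · simp [hnil]
  · simp only [hnil, ite_false]
    rw [splitFold_eq, appendIf_acc]
    have hzip : (pyDictItems detail_raw).zip
          ((pyDictItems detail_raw).map (fun kv => pySplitPipe kv.2))
        = (pyDictItems detail_raw).map (fun kv => (kv, pySplitPipe kv.2)) := by
      have h := @List.zip_map' (String × String) (String × String) (List String)
          id (fun kv => pySplitPipe kv.2) (pyDictItems detail_raw)
      simpa using h
    have key : ((pyDictItems detail_raw).map (fun kv => (kv, pySplitPipe kv.2))).foldl
          (fun hs p => fillField hs p.1.1 p.2)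
          (List.replicate ((((pyDictItems detail_raw).map (fun kv => pySplitPipe kv.2)).map
            List.length).foldl max 0) [])
        = (List.range (((pyDictItems detail_raw).map
              (fun kv => (pySplitPipe kv.2).length)).foldl max 0)).map
            (rowA ((pyDictItems detail_raw).map (fun kv => (kv.1, pySplitPipe kv.2)))) := by
      rw [← filled_eq_rows]
      simp [List.foldl_map, List.map_map, Function.comp_def]
    simp only [List.nil_append]
    rw [hzip, key]
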